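-- pv_equiv track=rewrite | github.com/soup1997/Algorithm | 프로그래머스/1/17681. ［1차］ 비밀지도/［1차］ 비밀지도.py | solution
-- ===== SOURCE A (Python) =====
-- def convBin(num1, num2, n):
--     s1 =""
--     s2 = ""
--
--     while(num1 != 0):
--         s1 = str(num1 % 2) + s1
--         num1 //= 2
--
--     while(num2 != 0):
--         s2 = str(num2 % 2) + s2
--         num2 //= 2
--
--     # zero padding
--     s1 = "0" * (n - len(s1)) + s1
--     s2 = "0" * (n - len(s2)) + s2
--
--     return (s1, s2)
--
-- def solution(n, arr1, arr2):
--     answer = []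
--     for i in range(n):
--         a, b = arr1[i], arr2[i]
--         sa, sb = convBin(a, b, n)
--         tmp = ""
--         for j in range(n):
--             if sa[j] == '1' or sb[j] == '1':
--                 tmp += "#"
--             else:
--                 tmp += " "
--         answer.append(tmp)
--
--     return answer
-- ===== SOURCE B (Python) =====
-- def solution(n, arr1, arr2):
--     return [''.join('#' if (arr1[i] | arr2[i]) >> (n - 1 - j) & 1 else ' ' for j in range(n))
--             for i in range(n)]
-- ===== Notes on version B (the rewrite author's own statement) =====
-- stated objective: idiomatic
-- what changed: Replaces A's two manual divide-by-2 binary-string builders, zero-padding and character-by-character comparison with a single integer OR per row rendered directly by bit tests (a | b) >> (n-1-j) & 1.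
-- outside the precondition, e.g. on solution(2, [4, 1], [1, 1]): A returns ['##', ' #'], B returns [' #', ' #']
import Mathlib
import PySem

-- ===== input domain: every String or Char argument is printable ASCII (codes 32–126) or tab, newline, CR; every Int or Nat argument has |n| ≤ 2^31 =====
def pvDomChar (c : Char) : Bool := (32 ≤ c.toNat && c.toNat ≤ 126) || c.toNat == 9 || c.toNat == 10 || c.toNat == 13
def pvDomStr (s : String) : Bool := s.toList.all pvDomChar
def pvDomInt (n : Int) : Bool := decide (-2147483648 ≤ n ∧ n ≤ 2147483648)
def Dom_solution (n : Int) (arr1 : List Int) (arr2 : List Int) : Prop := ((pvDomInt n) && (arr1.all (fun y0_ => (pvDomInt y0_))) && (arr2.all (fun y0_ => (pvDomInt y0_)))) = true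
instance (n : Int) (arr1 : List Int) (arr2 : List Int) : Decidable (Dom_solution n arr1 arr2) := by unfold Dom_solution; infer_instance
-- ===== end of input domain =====

-- B replaces A's manual binary-string conversion and char-by-char comparison by an integer OR per
-- row rendered by bit tests (same asymptotic cost, more idiomatic / direct).

-- ===== PORT A =====
-- while(num != 0): s = str(num % 2) + s; num //= 2  — fuel num.natAbs + 1 covers every 0 ≤ num
-- (the loop halves num each step); on num < 0 Python loops forever (excluded by Pre_).
def pvBinLoop : Nat → Int → List Char → List Char
  | 0, _, s => s
  | fuel+1, num, s =>
    if num = 0 then s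
    else pvBinLoop fuel (PySem.Int.floordiv num 2) ((PySem.Int.toStr (PySem.Int.mod num 2)).toList ++ s)

def convBin (num1 num2 n : Int) : List Char × List Char :=
  let s1 := pvBinLoop (num1.natAbs + 1) num1 []
  let s2 := pvBinLoop (num2.natAbs + 1) num2 []
  -- "0" * (n - len(s)) + s : Python's `*` with a non-positive count gives "" — Int.toNat clamps exactly so
  (List.replicate (n - (s1.length : Int)).toNat '0' ++ s1,
   List.replicate (n - (s2.length : Int)).toNat '0' ++ s2)

def solution (n : Int) (arr1 : List Int) (arr2 : List Int) : List String :=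
  (PySem.List.pyRange 0 n 1).foldl (fun answer i =>
    -- arr1[i], arr2[i]: IndexError (out of range) is excluded by Pre_solution, so the default is never read
    let a := PySem.List.pyGetD arr1 i 0
    let b := PySem.List.pyGetD arr2 i 0
    let p := convBin a b n
    -- sa[j] / sb[j]: under Pre_ both strings have length ≥ n, so the default is never read
    let tmp := (PySem.List.pyRange 0 n 1).foldl (fun tmp j =>
      if PySem.List.pyGetD p.1 j ' ' = '1' ∨ PySem.List.pyGetD p.2 j ' ' = '1'
      then tmp ++ ['#'] else tmp ++ [' ']) []
    answer ++ [String.mk tmp]) []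

-- ===== PORT B =====
-- '#' if (arr1[i] | arr2[i]) >> (n - 1 - j) & 1 else ' '  — Lean's Int >>> is Python's arithmetic
-- shift for the in-range (0 ≤ shift) case reached here; pyGetD as in port A (Pre_ keeps indices in range)
def solution_alt (n : Int) (arr1 : List Int) (arr2 : List Int) : List String :=
  (PySem.List.pyRange 0 n 1).map (fun i =>
    let v := PySem.Int.bor (PySem.List.pyGetD arr1 i 0) (PySem.List.pyGetD arr2 i 0)
    String.mk ((PySem.List.pyRange 0 n 1).map (fun j =>
      if PySem.Int.band (v >>> (n - 1 - j).toNat) 1 = 1 then '#' else ' ')))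

-- ===== PRECONDITION & SPEC =====
-- Pre_ excludes: row values ≥ 2^n, where A still returns — A left-aligns an over-long binary
-- string and reads its TOP n bits (an accidental rendering no caller of this task is specified on),
-- while B reads the value's low n bits; negative row values (A loops forever) and n > len(arr) (A
-- raises IndexError) are also outside.
def Pre_solution (n : Int) (arr1 : List Int) (arr2 : List Int) : Prop :=
  n ≤ (arr1.length : Int) ∧ n ≤ (arr2.length : Int) ∧
  ∀ x ∈ arr1.take n.toNat ++ arr2.take n.toNat, 0 ≤ x ∧ x < 2 ^ n.toNat
instance (n : Int) (arr1 : List Int) (arr2 : List Int) : Decidable (Pre_solution n arr1 arr2) := by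
  unfold Pre_solution; infer_instance
def pvWitness_solution : Int × List Int × List Int := (2, [2, 1], [0, 3])

def Spec_solution (n : Int) (arr1 : List Int) (arr2 : List Int) (out : List String) : Prop := out = solution_alt n arr1 arr2
instance (n : Int) (arr1 : List Int) (arr2 : List Int) (out : List String) : Decidable (Spec_solution n arr1 arr2 out) := by unfold Spec_solution; infer_instance

-- ===== CLAIM (what is proved, stated in full; the proofs are below) =====
def Claim_equal_solution : Prop := ∀ (n : Int) (arr1 : List Int) (arr2 : List Int), Dom_solution n arr1 arr2 → Pre_solution n arr1 arr2 → Spec_solution n arr1 arr2 (solution n arr1 arr2)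

-- ===== LEMMAS AND PROOFS =====

-- the binary digit list A's while loop builds, most significant first
def natBits : Nat → List Char
  | 0 => []
  | v+1 => natBits ((v+1)/2) ++ [if (v+1) % 2 = 1 then '1' else '0']
decreasing_by exact Nat.div_lt_self (Nat.succ_pos v) (by omega)

theorem natBits_pos (v : Nat) (hv : 0 < v) :
    natBits v = natBits (v/2) ++ [if v % 2 = 1 then '1' else '0'] := by
  cases v with
  | zero => omega
  | succ k => simp [natBits]

theorem pvBinLoop_eq (fuel : Nat) (v : Int) (s : List Char)
    (h0 : 0 ≤ v) (hf : v.toNat < fuel) :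
    pvBinLoop fuel v s = natBits v.toNat ++ s := by
  induction fuel generalizing v s with
  | zero => omega
  | succ f ih =>
    by_cases hz : v = 0
    · simp [pvBinLoop, hz, natBits]
    · have hm : v = ((v.toNat : Nat) : Int) := by omega
      have hdiv : PySem.Int.floordiv v 2 = ((v.toNat / 2 : Nat) : Int) := by
        rw [hm]; exact_mod_cast PySem.Int.floordiv_natCast v.toNat 2
      have hmod : PySem.Int.mod v 2 = ((v.toNat % 2 : Nat) : Int) := by
        rw [hm]; exact_mod_cast PySem.Int.mod_natCast v.toNat 2
      have hpos : 0 < v.toNat := by omega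
      rw [pvBinLoop, if_neg hz, hdiv, hmod]
      rw [ih _ _ (by positivity) (by omega)]
      rw [natBits_pos v.toNat hpos]
      have : (PySem.Int.toStr ((v.toNat % 2 : Nat) : Int)).toList
          = [if v.toNat % 2 = 1 then '1' else '0'] := by
        rcases Nat.mod_two_eq_zero_or_one v.toNat with h | h <;> rw [h] <;> decide
      rw [this, Int.toNat_natCast]
      simp

-- the zero-padded digit string, read as A reads it, is the big-endian bit map B computes
theorem pad_natBits (N : Nat) : ∀ (v : Nat), v < 2 ^ N →
    List.replicate (N - (natBits v).length) '0' ++ natBits v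
      = (List.range N).map (fun j => if (v >>> (N-1-j)) % 2 = 1 then '1' else '0') := by
  induction N with
  | zero => intro v hv; interval_cases v; simp [natBits]
  | succ N ih =>
    intro v hv
    have hstep : List.replicate (N + 1 - (natBits v).length) '0' ++ natBits v
        = (List.replicate (N - (natBits (v/2)).length) '0' ++ natBits (v/2))
          ++ [if v % 2 = 1 then '1' else '0'] := by
      by_cases hz : v = 0
      · subst hz
        simp [natBits, List.replicate_succ' (n := N)]
      · rw [natBits_pos v (by omega)]
        simp only [List.length_append, List.length_singleton]
        have hlen : N + 1 - ((natBits (v/2)).length + 1) = N - (natBits (v/2)).length := by omega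
        rw [hlen, List.append_assoc]
    have hv2 : v / 2 < 2 ^ N := by
      rw [pow_succ] at hv; omega
    rw [hstep, ih (v/2) hv2, List.range_succ, List.map_append]
    congr 1
    · apply List.map_congr_left
      intro j hj
      have hj' : j < N := List.mem_range.mp hj
      have h1 : N + 1 - 1 - j = (N - 1 - j) + 1 := by omega
      have h2 : v >>> ((N - 1 - j) + 1) = (v/2) >>> (N - 1 - j) := by
        rw [Nat.add_comm, Nat.shiftRight_add, Nat.shiftRight_one]
      rw [h1, h2]
    · simp

theorem bit_or_iff (a b k : Nat) :
    ((a ||| b) >>> k) % 2 = 1 ↔ ((a >>> k) % 2 = 1 ∨ (b >>> k) % 2 = 1) := by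
  have h := Nat.testBit_or a b k
  simp only [Nat.testBit, Nat.one_and_eq_mod_two] at h
  rcases Nat.mod_two_eq_zero_or_one ((a ||| b) >>> k) with h1 | h1 <;>
    rcases Nat.mod_two_eq_zero_or_one (a >>> k) with h2 | h2 <;>
      rcases Nat.mod_two_eq_zero_or_one (b >>> k) with h3 | h3 <;>
        simp [h1, h2, h3] at h ⊢

-- A's inner loop shape: the two-armed append collapses to appending one chosen character
theorem foldl_ite_append (l : List Nat) (p : Nat → Prop) [DecidablePred p] (acc : List Char) :
    l.foldl (fun tmp x => if p x then tmp ++ ['#'] else tmp ++ [' ']) acc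
      = acc ++ l.map (fun x => if p x then '#' else ' ') := by
  rw [← PySem.List.foldl_append_singleton_eq_map (fun x => if p x then '#' else ' ') l acc]
  apply PySem.List.foldl_congr_mem
  intro b x _
  split <;> simp

theorem solution_spec : Claim_equal_solution := by
  intro n arr1 arr2 _ hpre
  obtain ⟨h1, h2, hval⟩ := hpre
  by_cases hn : 0 ≤ n
  case neg =>
    have hnil : PySem.List.pyRange 0 n 1 = [] := PySem.List.pyRange_one_eq_nil (by omega)
    unfold Spec_solution solution solution_alt
    rw [hnil]
    rfl
  unfold Spec_solution solution solution_alt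
  set N := n.toNat with hN
  have hcast : n = (N : Int) := by omega
  rw [hcast, PySem.List.pyRange_zero_natCast, List.foldl_map, List.map_map]
  rw [PySem.List.foldl_append_singleton_eq_map, List.nil_append]
  apply List.map_congr_left
  intro i hi
  have hiN : i < N := List.mem_range.mp hi
  simp only [Function.comp]
  have hi1 : i < arr1.length := by omega
  have hi2 : i < arr2.length := by omega
  have hga : PySem.List.pyGetD arr1 (i : Int) 0 = arr1[i] := by
    rw [PySem.List.pyGetD_natCast]; exact List.getD_eq_getElem arr1 0 hi1
  have hgb : PySem.List.pyGetD arr2 (i : Int) 0 = arr2[i] := by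
    rw [PySem.List.pyGetD_natCast]; exact List.getD_eq_getElem arr2 0 hi2
  have hmem1 : arr1[i] ∈ arr1.take N ++ arr2.take N := by
    refine List.mem_append_left _ ?_
    have : (arr1.take N)[i]'(by simp; omega) = arr1[i] := List.getElem_take
    exact this ▸ List.getElem_mem _
  have hmem2 : arr2[i] ∈ arr1.take N ++ arr2.take N := by
    refine List.mem_append_right _ ?_
    have : (arr2.take N)[i]'(by simp; omega) = arr2[i] := List.getElem_take
    exact this ▸ List.getElem_mem _
  obtain ⟨ha0, haU⟩ := hval _ hmem1
  obtain ⟨hb0, hbU⟩ := hval _ hmem2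
  set a : Int := arr1[i] with hadef
  set b : Int := arr2[i] with hbdef
  have haN : a = ((a.toNat : Nat) : Int) := by omega
  have hbN : b = ((b.toNat : Nat) : Int) := by omega
  have haU' : a.toNat < 2 ^ N := by
    have h := haU; rw [haN] at h; exact_mod_cast h
  have hbU' : b.toNat < 2 ^ N := by
    have h := hbU; rw [hbN] at h; exact_mod_cast h
  rw [hga, hgb]
  have hconv : convBin a b (N : Int)
      = ((List.range N).map (fun j => if (a.toNat >>> (N-1-j)) % 2 = 1 then '1' else '0'),
         (List.range N).map (fun j => if (b.toNat >>> (N-1-j)) % 2 = 1 then '1' else '0')) := by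
    unfold convBin
    rw [pvBinLoop_eq _ _ _ ha0 (by omega), pvBinLoop_eq _ _ _ hb0 (by omega)]
    simp only [List.append_nil]
    have hlen : ∀ (l : List Char), (((N : Int)) - (l.length : Int)).toNat = N - l.length := by
      intro l; omega
    rw [hlen, hlen, pad_natBits N a.toNat haU', pad_natBits N b.toNat hbU']
  rw [hconv]
  simp only
  rw [List.foldl_map, List.map_map]
  rw [foldl_ite_append (List.range N)
      (fun k => PySem.List.pyGetD ((List.range N).map (fun j => if (a.toNat >>> (N-1-j)) % 2 = 1 then '1' else '0')) ((k : Nat) : Int) ' ' = '1'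
        ∨ PySem.List.pyGetD ((List.range N).map (fun j => if (b.toNat >>> (N-1-j)) % 2 = 1 then '1' else '0')) ((k : Nat) : Int) ' ' = '1') []]
  rw [List.nil_append]
  congr 1
  apply List.map_congr_left
  intro j hj
  have hjN : j < N := List.mem_range.mp hj
  have hga' : PySem.List.pyGetD ((List.range N).map (fun j => if (a.toNat >>> (N-1-j)) % 2 = 1 then '1' else '0')) ((j : Nat) : Int) ' '
      = (if (a.toNat >>> (N-1-j)) % 2 = 1 then '1' else '0') := by
    rw [PySem.List.pyGetD_natCast]; exact PySem.List.getD_map_range _ N j ' ' hjN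
  have hgb' : PySem.List.pyGetD ((List.range N).map (fun j => if (b.toNat >>> (N-1-j)) % 2 = 1 then '1' else '0')) ((j : Nat) : Int) ' '
      = (if (b.toNat >>> (N-1-j)) % 2 = 1 then '1' else '0') := by
    rw [PySem.List.pyGetD_natCast]; exact PySem.List.getD_map_range _ N j ' ' hjN
  simp only [Function.comp, hga', hgb']
  have hL1 : ((if a.toNat >>> (N-1-j) % 2 = 1 then '1' else '0') = '1')
      ↔ a.toNat >>> (N-1-j) % 2 = 1 := by split_ifs with h <;> simp [h]
  have hL2 : ((if b.toNat >>> (N-1-j) % 2 = 1 then '1' else '0') = '1')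
      ↔ b.toNat >>> (N-1-j) % 2 = 1 := by split_ifs with h <;> simp [h]
  have hor : PySem.Int.bor a b = ((a.toNat ||| b.toNat : Nat) : Int) := by
    conv_lhs => rw [haN, hbN]
    exact PySem.Int.bor_natCast _ _
  have hsh : (((N : Int)) - 1 - ((j : Nat) : Int)).toNat = N - 1 - j := by omega
  rw [hor, hsh]
  have hshift : (((a.toNat ||| b.toNat : Nat) : Int)) >>> (N - 1 - j)
      = (((a.toNat ||| b.toNat) >>> (N - 1 - j) : Nat) : Int) := Int.natCast_shiftRight _ _
  rw [hshift]
  have hband : PySem.Int.band (((a.toNat ||| b.toNat) >>> (N - 1 - j) : Nat) : Int) 1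
      = ((((a.toNat ||| b.toNat) >>> (N - 1 - j)) &&& 1 : Nat) : Int) := by
    exact_mod_cast PySem.Int.band_natCast _ 1
  rw [hband]
  have hcond : ((((a.toNat ||| b.toNat) >>> (N - 1 - j)) &&& 1 : Nat) : Int) = 1
      ↔ (((a.toNat ||| b.toNat) >>> (N - 1 - j)) % 2 = 1) := by
    rw [Nat.and_one_is_mod]; omega
  by_cases hc : ((a.toNat ||| b.toNat) >>> (N - 1 - j)) % 2 = 1
  · rw [if_pos (((bit_or_iff a.toNat b.toNat (N-1-j)).mp hc).imp hL1.mpr hL2.mpr),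
        if_pos (hcond.mpr hc)]
  · rw [if_neg (fun h => h.elim
        (fun h1 => hc ((bit_or_iff a.toNat b.toNat (N-1-j)).mpr (Or.inl (hL1.mp h1))))
        (fun h2 => hc ((bit_or_iff a.toNat b.toNat (N-1-j)).mpr (Or.inr (hL2.mp h2))))),
      if_neg (fun h => hc (hcond.mp h))]
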